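-- pv_equiv track=rewrite | github.com/EchoLenn/PVOE-UAM | 5_3_P3.py | identificarPais
-- ===== SOURCE A (Python) =====
-- def identificarPais(codigo):
--     paises = {
--         '0': 'Estados Unidos',
--         '380': 'Bulgaria',
--         '50': 'Inglaterra',
--         '539': 'Irlanda',
--         '560': 'Portugal',
--         '70': 'Noruega',
--         '759': 'Venezuela',
--         '850': 'Cuba',
--         '890': 'India',
--     }
--     for clave in sorted(paises, key=lambda x: -len(x)):
--         if codigo.startswith(clave):
--             return paises[clave]
--     return 'Desconocido'
-- ===== SOURCE B (Python) =====
-- def identificarPais(codigo):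
--     # The nine known prefixes are prefix-free, so a decision tree on the
--     # leading characters (no dict, no loop) gives the same answer.
--     first = codigo[:1]
--     if first == '0':
--         return 'Estados Unidos'
--     if first == '3':
--         return 'Bulgaria' if codigo[1:3] == '80' else 'Desconocido'
--     if first == '5':
--         if codigo[1:2] == '0':
--             return 'Inglaterra'
--         if codigo[1:3] == '39':
--             return 'Irlanda'
--         if codigo[1:3] == '60':
--             return 'Portugal'
--         return 'Desconocido'
--     if first == '7':
--         if codigo[1:2] == '0':
--             return 'Noruega'
--         return 'Venezuela' if codigo[1:3] == '59' else 'Desconocido'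
--     if first == '8':
--         rest = codigo[1:3]
--         if rest == '50':
--             return 'Cuba'
--         if rest == '90':
--             return 'India'
--         return 'Desconocido'
--     return 'Desconocido'
-- ===== Notes on version B (the rewrite author's own statement) =====
-- stated objective: alternative
-- what changed: B replaces A's sort-keys-by-descending-length-then-startswith scan over a dict with a hand-coded decision tree on the leading characters of codigo (no dict, no sort, no loop); this is correct because the nine prefixes are prefix-free, so at most one can match.
import Mathlib
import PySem

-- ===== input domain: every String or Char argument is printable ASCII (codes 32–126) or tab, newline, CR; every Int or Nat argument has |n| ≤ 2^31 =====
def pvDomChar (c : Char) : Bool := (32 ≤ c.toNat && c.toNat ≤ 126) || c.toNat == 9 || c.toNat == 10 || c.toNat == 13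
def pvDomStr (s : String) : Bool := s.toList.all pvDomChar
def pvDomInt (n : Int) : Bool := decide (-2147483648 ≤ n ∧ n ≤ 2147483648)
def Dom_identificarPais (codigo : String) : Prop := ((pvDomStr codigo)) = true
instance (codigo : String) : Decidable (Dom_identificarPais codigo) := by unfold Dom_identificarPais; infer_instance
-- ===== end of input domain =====

-- B replaces A's sort-then-startswith scan over a dict by a loop-free decision tree on the
-- leading characters of codigo; equal because the nine prefixes are prefix-free.

-- ===== PORT A =====
def pvPaisesA : PySem.Dict String String := PySem.Dict.ofList
  [("0","Estados Unidos"),("380","Bulgaria"),("50","Inglaterra"),("539","Irlanda"),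
   ("560","Portugal"),("70","Noruega"),("759","Venezuela"),("850","Cuba"),("890","India")]

def identificarPais (codigo : String) : String :=
  let paises := pvPaisesA
  let res := (PySem.List.sorted paises.keys (fun x => -(PySem.Str.len x)) false).foldl
    (fun acc clave =>
      match acc with
      | some r => some r
      | none =>
        if PySem.Str.startswith codigo clave then some ((paises.get? clave).getD "") else none)
    none
  match res with
  | some r => r
  | none => "Desconocido"

-- ===== PORT B =====
def identificarPais_alt (codigo : String) : String :=
  let first := PySem.Str.slice codigo none (some 1)
  if first = "0" then "Estados Unidos"
  else if first = "3" then
    (if PySem.Str.slice codigo (some 1) (some 3) = "80" then "Bulgaria" else "Desconocido")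
  else if first = "5" then
    (if PySem.Str.slice codigo (some 1) (some 2) = "0" then "Inglaterra"
     else if PySem.Str.slice codigo (some 1) (some 3) = "39" then "Irlanda"
     else if PySem.Str.slice codigo (some 1) (some 3) = "60" then "Portugal"
     else "Desconocido")
  else if first = "7" then
    (if PySem.Str.slice codigo (some 1) (some 2) = "0" then "Noruega"
     else if PySem.Str.slice codigo (some 1) (some 3) = "59" then "Venezuela"
     else "Desconocido")
  else if first = "8" then
    let rest := PySem.Str.slice codigo (some 1) (some 3)
    if rest = "50" then "Cuba"
    else if rest = "90" then "India"
    else "Desconocido"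
  else "Desconocido"

-- ===== PRECONDITION & SPEC =====
def Spec_identificarPais (codigo : String) (out : String) : Prop := out = identificarPais_alt codigo
instance (codigo : String) (out : String) : Decidable (Spec_identificarPais codigo out) := by unfold Spec_identificarPais; infer_instance

-- ===== CLAIM =====
def Claim_equal_identificarPais : Prop := ∀ (codigo : String), Dom_identificarPais codigo → Spec_identificarPais codigo (identificarPais codigo)

-- ===== LEMMAS AND PROOFS =====

-- list-level characterization of A's result
def pvA (l : List Char) : String :=
  if ['3','8','0'] <+: l then "Bulgaria"
  else if ['5','3','9'] <+: l then "Irlanda"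
  else if ['5','6','0'] <+: l then "Portugal"
  else if ['7','5','9'] <+: l then "Venezuela"
  else if ['8','5','0'] <+: l then "Cuba"
  else if ['8','9','0'] <+: l then "India"
  else if ['5','0'] <+: l then "Inglaterra"
  else if ['7','0'] <+: l then "Noruega"
  else if ['0'] <+: l then "Estados Unidos"
  else "Desconocido"

-- list-level characterization of B's result
def pvB (l : List Char) : String :=
  if l.take 1 = ['0'] then "Estados Unidos"
  else if l.take 1 = ['3'] then
    (if (l.drop 1).take 2 = ['8','0'] then "Bulgaria" else "Desconocido")
  else if l.take 1 = ['5'] then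
    (if (l.drop 1).take 1 = ['0'] then "Inglaterra"
     else if (l.drop 1).take 2 = ['3','9'] then "Irlanda"
     else if (l.drop 1).take 2 = ['6','0'] then "Portugal"
     else "Desconocido")
  else if l.take 1 = ['7'] then
    (if (l.drop 1).take 1 = ['0'] then "Noruega"
     else if (l.drop 1).take 2 = ['5','9'] then "Venezuela"
     else "Desconocido")
  else if l.take 1 = ['8'] then
    (if (l.drop 1).take 2 = ['5','0'] then "Cuba"
     else if (l.drop 1).take 2 = ['9','0'] then "India"
     else "Desconocido")
  else "Desconocido"

theorem pv_sortedA : PySem.List.sorted pvPaisesA.keys (fun x => -(PySem.Str.len x)) false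
    = ["380","539","560","759","850","890","50","70","0"] := by decide

theorem pv_str_eq_iff (s t : String) : s = t ↔ s.toList = t.toList :=
  ⟨fun h => by rw [h], fun h => by
    have := congrArg String.ofList h
    rwa [String.ofList_toList, String.ofList_toList] at this⟩

-- the first-match shape of A's fold
def pvFirst (s : String) : List String → Option String
  | [] => none
  | k :: ks =>
      if PySem.Str.startswith s k then some ((pvPaisesA.get? k).getD "") else pvFirst s ks

theorem pv_foldl_some (s : String) (ks : List String) (r : String) :
    ks.foldl
      (fun acc clave =>
        match acc with
        | some r' => some r'
        | none =>
          if PySem.Str.startswith s clave then some ((pvPaisesA.get? clave).getD "") else none)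
      (some r) = some r := by
  induction ks with
  | nil => rfl
  | cons k ks ih => simpa [List.foldl] using ih

theorem pv_foldA (s : String) (ks : List String) :
    ks.foldl
      (fun acc clave =>
        match acc with
        | some r' => some r'
        | none =>
          if PySem.Str.startswith s clave then some ((pvPaisesA.get? clave).getD "") else none)
      none = pvFirst s ks := by
  induction ks with
  | nil => rfl
  | cons k ks ih =>
      simp only [List.foldl]
      by_cases h : PySem.Str.startswith s k = true
      · rw [pvFirst, if_pos h, if_pos h]; exact pv_foldl_some s ks _
      · rw [pvFirst, if_neg h, if_neg h]; exact ih

theorem pv_get_380 : ((pvPaisesA.get? "380").getD "") = "Bulgaria" := by decide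
theorem pv_get_539 : ((pvPaisesA.get? "539").getD "") = "Irlanda" := by decide
theorem pv_get_560 : ((pvPaisesA.get? "560").getD "") = "Portugal" := by decide
theorem pv_get_759 : ((pvPaisesA.get? "759").getD "") = "Venezuela" := by decide
theorem pv_get_850 : ((pvPaisesA.get? "850").getD "") = "Cuba" := by decide
theorem pv_get_890 : ((pvPaisesA.get? "890").getD "") = "India" := by decide
theorem pv_get_50 : ((pvPaisesA.get? "50").getD "") = "Inglaterra" := by decide
theorem pv_get_70 : ((pvPaisesA.get? "70").getD "") = "Noruega" := by decide
theorem pv_get_0 : ((pvPaisesA.get? "0").getD "") = "Estados Unidos" := by decide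

theorem pvA_eq (s : String) : identificarPais s = pvA s.toList := by
  have e380 : ("380" : String).toList = ['3','8','0'] := by decide
  have e539 : ("539" : String).toList = ['5','3','9'] := by decide
  have e560 : ("560" : String).toList = ['5','6','0'] := by decide
  have e759 : ("759" : String).toList = ['7','5','9'] := by decide
  have e850 : ("850" : String).toList = ['8','5','0'] := by decide
  have e890 : ("890" : String).toList = ['8','9','0'] := by decide
  have e50 : ("50" : String).toList = ['5','0'] := by decide
  have e70 : ("70" : String).toList = ['7','0'] := by decide
  have e0 : ("0" : String).toList = ['0'] := by decide
  simp only [identificarPais]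
  rw [pv_sortedA, pv_foldA]
  simp only [pvFirst, pv_get_380, pv_get_539, pv_get_560, pv_get_759, pv_get_850, pv_get_890,
    pv_get_50, pv_get_70, pv_get_0]
  simp [pvA, apply_ite (f := fun o : Option String => match o with
          | some r => r
          | none => "Desconocido"),
    PySem.Str.startswith_eq, PySem.Chars.startswith_iff, e380, e539, e560, e759, e850, e890,
    e50, e70, e0]

theorem pv_slice_to_one (s : String) :
    (PySem.Str.slice s none (some 1)).toList = s.toList.take 1 := by
  have h := PySem.List.slice_to_natCast (xs := s.toList) (b := 1)
  norm_num at h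
  simp [PySem.Str.toList_slice, h]

theorem pv_slice_13 (s : String) :
    (PySem.Str.slice s (some 1) (some 3)).toList = (s.toList.drop 1).take 2 := by
  have h := PySem.List.slice_natCast (xs := s.toList) (a := 1) (b := 3)
  norm_num at h
  simp [PySem.Str.toList_slice, h]

theorem pv_slice_12 (s : String) :
    (PySem.Str.slice s (some 1) (some 2)).toList = (s.toList.drop 1).take 1 := by
  have h := PySem.List.slice_natCast (xs := s.toList) (a := 1) (b := 2)
  norm_num at h
  simp [PySem.Str.toList_slice, h]

theorem pvB_eq (s : String) : identificarPais_alt s = pvB s.toList := by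
  have e0 : ("0" : String).toList = ['0'] := by decide
  have e3 : ("3" : String).toList = ['3'] := by decide
  have e5 : ("5" : String).toList = ['5'] := by decide
  have e7 : ("7" : String).toList = ['7'] := by decide
  have e8 : ("8" : String).toList = ['8'] := by decide
  have e80 : ("80" : String).toList = ['8','0'] := by decide
  have e39 : ("39" : String).toList = ['3','9'] := by decide
  have e60 : ("60" : String).toList = ['6','0'] := by decide
  have e59 : ("59" : String).toList = ['5','9'] := by decide
  have e50 : ("50" : String).toList = ['5','0'] := by decide
  have e90 : ("90" : String).toList = ['9','0'] := by decide
  simp only [identificarPais_alt, pvB, pv_str_eq_iff, pv_slice_to_one, pv_slice_13, pv_slice_12,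
    e0, e3, e5, e7, e8, e80, e39, e60, e59, e50, e90, List.drop_one]

theorem pvAB (l : List Char) : pvA l = pvB l := by
  match l with
  | [] => rfl
  | [a] =>
      by_cases ha : a = '0'
      · subst ha; rfl
      · have n : ¬('0' = a) := fun x => ha x.symm
        simp [pvA, pvB, List.cons_prefix_cons, ha, n]
  | [a, b] =>
      by_cases ha0 : a = '0'
      · subst ha0; simp [pvA, pvB, List.cons_prefix_cons]
      by_cases ha5 : a = '5'
      · subst ha5
        by_cases hb : b = '0'
        · subst hb; rfl
        · have n : ¬('0' = b) := fun x => hb x.symm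
          simp [pvA, pvB, List.cons_prefix_cons, hb, n]
      by_cases ha7 : a = '7'
      · subst ha7
        by_cases hb : b = '0'
        · subst hb; rfl
        · have n : ¬('0' = b) := fun x => hb x.symm
          simp [pvA, pvB, List.cons_prefix_cons, hb, n]
      · have n0 : ¬('0' = a) := fun x => ha0 x.symm
        have n5 : ¬('5' = a) := fun x => ha5 x.symm
        have n7 : ¬('7' = a) := fun x => ha7 x.symm
        simp [pvA, pvB, List.cons_prefix_cons, ha0, ha5, ha7, n0, n5, n7]
  | a :: b :: c :: rest =>
      by_cases ha0 : a = '0'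
      · subst ha0; simp [pvA, pvB, List.cons_prefix_cons]
      by_cases ha3 : a = '3'
      · subst ha3
        by_cases hbc : b = '8' ∧ c = '0'
        · obtain ⟨rfl, rfl⟩ := hbc; simp [pvA, pvB, List.cons_prefix_cons]
        · have n : ¬('8' = b ∧ '0' = c) := fun ⟨x, y⟩ => hbc ⟨x.symm, y.symm⟩
          have n' : ¬(b = '8' ∧ c = '0') := hbc
          simp [pvA, pvB, List.cons_prefix_cons, n, n']
      by_cases ha5 : a = '5'
      · subst ha5
        by_cases hb0 : b = '0'
        · subst hb0; simp [pvA, pvB, List.cons_prefix_cons]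
        by_cases h39 : b = '3' ∧ c = '9'
        · obtain ⟨rfl, rfl⟩ := h39; simp [pvA, pvB, List.cons_prefix_cons]
        by_cases h60 : b = '6' ∧ c = '0'
        · obtain ⟨rfl, rfl⟩ := h60; simp [pvA, pvB, List.cons_prefix_cons]
        · have m0 : ¬('0' = b) := fun x => hb0 x.symm
          have m39 : ¬('3' = b ∧ '9' = c) := fun ⟨x, y⟩ => h39 ⟨x.symm, y.symm⟩
          have m60 : ¬('6' = b ∧ '0' = c) := fun ⟨x, y⟩ => h60 ⟨x.symm, y.symm⟩
          simp [pvA, pvB, List.cons_prefix_cons, hb0, h39, h60, m0, m39, m60]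
      by_cases ha7 : a = '7'
      · subst ha7
        by_cases hb0 : b = '0'
        · subst hb0; simp [pvA, pvB, List.cons_prefix_cons]
        by_cases h59 : b = '5' ∧ c = '9'
        · obtain ⟨rfl, rfl⟩ := h59; simp [pvA, pvB, List.cons_prefix_cons]
        · have m0 : ¬('0' = b) := fun x => hb0 x.symm
          have m59 : ¬('5' = b ∧ '9' = c) := fun ⟨x, y⟩ => h59 ⟨x.symm, y.symm⟩
          simp [pvA, pvB, List.cons_prefix_cons, hb0, h59, m0, m59]
      by_cases ha8 : a = '8'
      · subst ha8
        by_cases h50 : b = '5' ∧ c = '0'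
        · obtain ⟨rfl, rfl⟩ := h50; simp [pvA, pvB, List.cons_prefix_cons]
        by_cases h90 : b = '9' ∧ c = '0'
        · obtain ⟨rfl, rfl⟩ := h90; simp [pvA, pvB, List.cons_prefix_cons]
        · have m50 : ¬('5' = b ∧ '0' = c) := fun ⟨x, y⟩ => h50 ⟨x.symm, y.symm⟩
          have m90 : ¬('9' = b ∧ '0' = c) := fun ⟨x, y⟩ => h90 ⟨x.symm, y.symm⟩
          simp [pvA, pvB, List.cons_prefix_cons, h50, h90, m50, m90]
      · have n0 : ¬('0' = a) := fun x => ha0 x.symm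
        have n3 : ¬('3' = a) := fun x => ha3 x.symm
        have n5 : ¬('5' = a) := fun x => ha5 x.symm
        have n7 : ¬('7' = a) := fun x => ha7 x.symm
        have n8 : ¬('8' = a) := fun x => ha8 x.symm
        simp [pvA, pvB, List.cons_prefix_cons, ha0, ha3, ha5, ha7, ha8, n0, n3, n5, n7, n8]

-- ===== VERDICT =====
theorem identificarPais_spec : Claim_equal_identificarPais := by
  intro codigo _
  unfold Spec_identificarPais
  rw [pvA_eq, pvB_eq, pvAB]
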